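-- pv_equiv track=rewrite | github.com/Dragallur/adventofcode | 2023/day7/python.py | highest_card
-- ===== SOURCE A (Python) =====
-- card_strength = ["2", "3", "4", "5", "6", "7", "8", "9", "T", "J", "Q", "K", "A"]
--
-- def highest_card(hand1, hand2, ind = 0):
--     if hand1[ind] == hand2[ind]:
--         ind += 1
--         return highest_card(hand1, hand2, ind)
--     else:
--         if card_strength.index(hand1[ind]) > card_strength.index(hand2[ind]):
--             return hand1
--         else:
--             return hand2
-- ===== SOURCE B (Python) =====
-- card_strength = ["2", "3", "4", "5", "6", "7", "8", "9", "T", "J", "Q", "K", "A"]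
--
-- def highest_card(hand1, hand2, ind=0):
--     # iterative: first scan forward to the first differing position, then compare once
--     while hand1[ind] == hand2[ind]:
--         ind += 1
--     order = "23456789TJQKA"
--     return hand1 if order.index(hand1[ind]) > order.index(hand2[ind]) else hand2
-- ===== Notes on version B (the rewrite author's own statement) =====
-- stated objective: simpler
-- what changed: Replaces the recursion with an iterative scan that first finds the first differing index and then does a single strength comparison against a string order table instead of a list.
import Mathlib
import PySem

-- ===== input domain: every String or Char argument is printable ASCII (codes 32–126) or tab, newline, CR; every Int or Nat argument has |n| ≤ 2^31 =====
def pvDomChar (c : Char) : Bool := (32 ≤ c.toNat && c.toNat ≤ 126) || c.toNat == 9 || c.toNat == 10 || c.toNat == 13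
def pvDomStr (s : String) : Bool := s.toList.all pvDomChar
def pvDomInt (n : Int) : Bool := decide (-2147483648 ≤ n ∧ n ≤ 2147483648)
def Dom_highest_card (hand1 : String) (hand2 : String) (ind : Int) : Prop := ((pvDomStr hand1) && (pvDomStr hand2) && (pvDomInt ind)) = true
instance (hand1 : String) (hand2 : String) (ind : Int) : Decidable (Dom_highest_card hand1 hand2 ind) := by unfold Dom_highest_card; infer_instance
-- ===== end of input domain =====

-- B replaces A's recursion by an iterative scan for the first differing index followed by one
-- strength comparison (objective: simpler). Return-value equivalence only; neither mutates arguments.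

-- termination helper: a successful Python index access is below the length
theorem pvGetSomeLt {s : List Char} {i : Int} {c : Char}
    (h : PySem.List.pyGet? s i = some c) : i < (s.length : Int) := by
  by_contra hge
  have : PySem.List.pyGet? s i = none := by
    rw [PySem.List.pyGet?_eq_none_iff, PySem.Raise.InRange]
    omega
  simp [this] at h

-- ===== PORT A =====
def card_strengthA : List Char := ['2','3','4','5','6','7','8','9','T','J','Q','K','A']

-- literal port of A's recursion; Python raises (IndexError/ValueError) exactly where a `none`
-- branch returns "" — those inputs are outside Pre_highest_card
def highest_card (hand1 : String) (hand2 : String) (ind : Int) : String :=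
  match h1 : PySem.List.pyGet? hand1.toList ind, PySem.List.pyGet? hand2.toList ind with
  | some c1, some c2 =>
    if c1 = c2 then
      highest_card hand1 hand2 (ind + 1)
    else
      match PySem.List.index? card_strengthA c1, PySem.List.index? card_strengthA c2 with
      | some i1, some i2 => if i1 > i2 then hand1 else hand2
      | _, _ => ""        -- ValueError
  | _, _ => ""            -- IndexError
termination_by ((hand1.toList.length : Int) + 1 - ind).toNat
decreasing_by
  have := pvGetSomeLt h1
  omega

-- ===== PORT B =====
-- B's while loop: return the first index ≥ ind where the hands differ (none = IndexError)
def scanDiff (hand1 : String) (hand2 : String) (ind : Int) : Option Int :=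
  match h1 : PySem.List.pyGet? hand1.toList ind with
  | none => none
  | some c1 =>
    match PySem.List.pyGet? hand2.toList ind with
    | none => none
    | some c2 => if c1 = c2 then scanDiff hand1 hand2 (ind + 1) else some ind
termination_by ((hand1.toList.length : Int) + 1 - ind).toNat
decreasing_by
  have := pvGetSomeLt h1
  omega

def orderB : List Char := "23456789TJQKA".toList

def highest_card_alt (hand1 : String) (hand2 : String) (ind : Int) : String :=
  match scanDiff hand1 hand2 ind with
  | none => ""            -- IndexError in the while condition
  | some j =>
    match PySem.List.pyGet? hand1.toList j with
    | none => ""          -- unreachable: scanDiff returned an in-range index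
    | some c1 =>
      match PySem.List.pyGet? hand2.toList j with
      | none => ""        -- unreachable
      | some c2 =>
        match PySem.List.index? orderB c1 with
        | none => ""      -- ValueError from str.index
        | some i1 =>
          match PySem.List.index? orderB c2 with
          | none => ""    -- ValueError from str.index
          | some i2 => if i1 > i2 then hand1 else hand2

-- ===== PRECONDITION & SPEC =====
-- Pre_: exactly the inputs on which Python A returns normally — scanning from ind there is a first
-- position where the two hands hold different cards, both accesses on the way are in range, and both
-- differing cards occur in the strength table (otherwise A raises IndexError/ValueError).
def Pre_highest_card (hand1 : String) (hand2 : String) (ind : Int) : Prop :=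
  ∃ n : Nat, n ≤ 2 * hand1.toList.length ∧
    (∀ m : Nat, m < n →
      (PySem.List.pyGet? hand1.toList (ind + m)).isSome = true ∧
      PySem.List.pyGet? hand1.toList (ind + m) = PySem.List.pyGet? hand2.toList (ind + m)) ∧
    ((PySem.List.pyGet? hand1.toList (ind + n)).any
        (fun c => (['2','3','4','5','6','7','8','9','T','J','Q','K','A'] : List Char).contains c) = true) ∧
    ((PySem.List.pyGet? hand2.toList (ind + n)).any
        (fun c => (['2','3','4','5','6','7','8','9','T','J','Q','K','A'] : List Char).contains c) = true) ∧
    PySem.List.pyGet? hand1.toList (ind + n) ≠ PySem.List.pyGet? hand2.toList (ind + n)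

instance (hand1 : String) (hand2 : String) (ind : Int) : Decidable (Pre_highest_card hand1 hand2 ind) := by
  unfold Pre_highest_card; infer_instance

def pvWitness_highest_card : String × String × Int := ("2A", "2K", 0)

def Spec_highest_card (hand1 : String) (hand2 : String) (ind : Int) (out : String) : Prop := out = highest_card_alt hand1 hand2 ind
instance (hand1 : String) (hand2 : String) (ind : Int) (out : String) : Decidable (Spec_highest_card hand1 hand2 ind out) := by unfold Spec_highest_card; infer_instance

-- ===== CLAIM (what is proved, stated in full; the proofs are below) =====
def Claim_equal_highest_card : Prop := ∀ (hand1 : String) (hand2 : String) (ind : Int), Dom_highest_card hand1 hand2 ind → Pre_highest_card hand1 hand2 ind → Spec_highest_card hand1 hand2 ind (highest_card hand1 hand2 ind)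

-- ===== LEMMAS AND PROOFS =====

theorem scanDiff_step (hand1 hand2 : String) (ind : Int) :
    scanDiff hand1 hand2 ind =
      match PySem.List.pyGet? hand1.toList ind with
      | none => none
      | some c1 =>
        match PySem.List.pyGet? hand2.toList ind with
        | none => none
        | some c2 => if c1 = c2 then scanDiff hand1 hand2 (ind + 1) else some ind := by
  rw [scanDiff]
  split <;> simp_all

theorem orderB_eq : orderB = card_strengthA := by decide

theorem pv_agree (hand1 hand2 : String) (ind : Int) :
    highest_card hand1 hand2 ind = highest_card_alt hand1 hand2 ind := by
  fun_induction highest_card hand1 hand2 ind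
  case case1 =>
    rename_i ind c h2 h1 ih
    rw [ih]
    unfold highest_card_alt
    rw [scanDiff_step hand1 hand2 ind]
    simp [h1, h2]
  case case2 =>
    rename_i ind c1 c2 h1 h2 hne i1 i2 hi2 hi1 hgt
    unfold highest_card_alt
    rw [scanDiff_step hand1 hand2 ind]
    simp only [PySem.List.index?_eq_idxOf?] at hi1 hi2
    simp [h1, h2, hne, orderB_eq, hi1, hi2, hgt]
  case case3 =>
    rename_i ind c1 c2 h1 h2 hne i1 i2 hi2 hi1 hgt
    unfold highest_card_alt
    rw [scanDiff_step hand1 hand2 ind]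
    simp only [PySem.List.index?_eq_idxOf?] at hi1 hi2
    simp [h1, h2, hne, orderB_eq, hi1, hi2, hgt]
  case case4 =>
    rename_i ind c1 c2 h1 h2 hne hidx
    unfold highest_card_alt
    rw [scanDiff_step hand1 hand2 ind]
    simp only [PySem.List.index?_eq_idxOf?] at hidx
    rcases hc1 : List.idxOf? c1 card_strengthA with _ | i1 <;>
      rcases hc2 : List.idxOf? c2 card_strengthA with _ | i2 <;>
      simp [h1, h2, hne, orderB_eq, hc1, hc2] <;>
      exact absurd hc2 (hidx i1 i2 hc1)
  case case5 =>
    rename_i ind hget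
    unfold highest_card_alt
    rw [scanDiff_step hand1 hand2 ind]
    rcases ho1 : PySem.List.pyGet? hand1.toList ind with _ | c1 <;>
      rcases ho2 : PySem.List.pyGet? hand2.toList ind with _ | c2 <;>
      simp_all

-- ===== VERDICT (by name: the statement is the Claim_ definition above) =====
theorem highest_card_spec : Claim_equal_highest_card := by
  intro hand1 hand2 ind _ _
  unfold Spec_highest_card
  exact pv_agree hand1 hand2 ind
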